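-- pv_equiv track=rewrite | github.com/epieratti/calia-bi-reports | loterias2026-20260406/scripts/build_dossier_completo.py | profiles_in_summary_order
-- ===== SOURCE A (Python) =====
-- def profiles_in_summary_order(profiles_cfg: list, tier_order: list) -> list[dict]:
--     """Mesma ordem da Tabela resumo: tier_order, depois perfis sem tier conhecido."""
--     known = set(tier_order)
--     ordered: list[dict] = []
--     for t in tier_order:
--         ordered.extend([p for p in profiles_cfg if p.get("tier") == t])
--     for p in profiles_cfg:
--         if p.get("tier") not in known:
--             ordered.append(p)
--     return ordered
-- ===== SOURCE B (Python) =====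
-- def profiles_in_summary_order(profiles_cfg: list, tier_order: list) -> list:
--     """Same result as A: group profiles by tier in one pass, then emit per tier_order."""
--     known = set(tier_order)
--     groups: dict = {}
--     rest = []
--     for p in profiles_cfg:
--         t = p.get("tier")
--         if t in known:
--             groups[t] = groups.get(t, []) + [p]
--         else:
--             rest.append(p)
--     out = []
--     for t in tier_order:
--         out += groups.get(t, [])
--     return out + rest
-- ===== Notes on version B (the rewrite author's own statement) =====
-- stated objective: faster
-- what changed: B replaces A's per-tier scan of the whole profile list (one filter pass per tier) by a single grouping pass that buckets profiles by tier into a dict and splits off unknown-tier profiles, then emits the buckets in tier_order.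
import Mathlib
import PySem

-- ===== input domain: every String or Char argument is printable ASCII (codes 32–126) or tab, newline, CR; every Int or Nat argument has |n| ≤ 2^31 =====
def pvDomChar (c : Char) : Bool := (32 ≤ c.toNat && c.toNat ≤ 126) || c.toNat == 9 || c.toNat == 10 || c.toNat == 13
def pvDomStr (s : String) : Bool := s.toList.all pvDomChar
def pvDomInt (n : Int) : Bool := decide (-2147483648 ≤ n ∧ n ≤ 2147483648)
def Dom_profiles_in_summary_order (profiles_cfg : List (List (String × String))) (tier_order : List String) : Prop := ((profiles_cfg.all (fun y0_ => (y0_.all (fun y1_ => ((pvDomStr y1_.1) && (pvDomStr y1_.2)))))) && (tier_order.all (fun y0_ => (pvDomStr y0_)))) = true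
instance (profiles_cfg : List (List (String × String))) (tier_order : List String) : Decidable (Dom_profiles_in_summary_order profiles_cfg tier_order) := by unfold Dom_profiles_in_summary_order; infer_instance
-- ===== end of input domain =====

-- B replaces A's per-tier rescans of profiles_cfg by a single grouping pass into a dict (objective: faster, asymptotic O(T*P) → O(P+T)).


-- ===== PORT A =====
def profiles_in_summary_order (profiles_cfg : List (List (String × String))) (tier_order : List String) : List (List (String × String)) :=
  let known : PySem.Set String := PySem.Set.ofList tier_order
  -- for t in tier_order: ordered.extend([p for p in profiles_cfg if p.get("tier") == t])
  let ordered : List (List (String × String)) :=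
    tier_order.foldl
      (fun acc t => acc ++ profiles_cfg.filter (fun p => (PySem.Dict.mk p).get? "tier" == some t)) []
  -- for p in profiles_cfg: if p.get("tier") not in known: ordered.append(p)
  profiles_cfg.foldl
    (fun acc p =>
      if (match (PySem.Dict.mk p).get? "tier" with
          | none => true
          | some v => !(PySem.Set.contains known v)) then acc ++ [p] else acc)
    ordered

-- ===== PORT B =====
-- one grouping pass over profiles_cfg: state = (groups : dict tier → bucket, rest)
def profiles_in_summary_order_alt (profiles_cfg : List (List (String × String))) (tier_order : List String) : List (List (String × String)) :=
  let known : PySem.Set String := PySem.Set.ofList tier_order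
  let st :=
    profiles_cfg.foldl
      (fun (st : PySem.Dict String (List (List (String × String))) × List (List (String × String))) p =>
        match (PySem.Dict.mk p).get? "tier" with
        | some t =>
            if PySem.Set.contains known t then
              -- groups[t] = groups.get(t, []) + [p]
              (st.1.modify t [] (· ++ [p]), st.2)
            else (st.1, st.2 ++ [p])
        | none => (st.1, st.2 ++ [p]))
      (PySem.Dict.empty, [])
  -- for t in tier_order: out += groups.get(t, [])
  let out := tier_order.foldl (fun acc t => acc ++ st.1.getD t []) []
  out ++ st.2

-- ===== PRECONDITION & SPEC =====
def Spec_profiles_in_summary_order (profiles_cfg : List (List (String × String))) (tier_order : List String) (out : List (List (String × String))) : Prop := out = profiles_in_summary_order_alt profiles_cfg tier_order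
instance (profiles_cfg : List (List (String × String))) (tier_order : List String) (out : List (List (String × String))) : Decidable (Spec_profiles_in_summary_order profiles_cfg tier_order out) := by unfold Spec_profiles_in_summary_order; infer_instance

-- ===== CLAIM (what is proved, stated in full; the proofs are below) =====
def Claim_equal_profiles_in_summary_order : Prop := ∀ (profiles_cfg : List (List (String × String))) (tier_order : List String), Dom_profiles_in_summary_order profiles_cfg tier_order → Spec_profiles_in_summary_order profiles_cfg tier_order (profiles_in_summary_order profiles_cfg tier_order)

-- ===== LEMMAS AND PROOFS =====

-- B's grouping loop, abbreviated for the lemmas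
def pvStep (known : PySem.Set String)
    (st : PySem.Dict String (List (List (String × String))) × List (List (String × String)))
    (p : List (String × String)) :
    PySem.Dict String (List (List (String × String))) × List (List (String × String)) :=
  match (PySem.Dict.mk p).get? "tier" with
  | some t =>
      if PySem.Set.contains known t then (st.1.modify t [] (· ++ [p]), st.2)
      else (st.1, st.2 ++ [p])
  | none => (st.1, st.2 ++ [p])

-- bucket invariant: for a known tier t, the bucket collects exactly A's filter, in order
lemma pvLoop_fst (known : PySem.Set String) (t : String) (ht : PySem.Set.contains known t = true)
    (cfg : List (List (String × String)))
    (d : PySem.Dict String (List (List (String × String)))) (r : List (List (String × String))) :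
    ((cfg.foldl (pvStep known) (d, r)).1).getD t []
      = d.getD t [] ++ cfg.filter (fun p => (PySem.Dict.mk p).get? "tier" == some t) := by
  induction cfg generalizing d r with
  | nil => simp
  | cons p cfg ih =>
    simp only [List.foldl_cons, List.filter_cons, pvStep]
    cases hg : (PySem.Dict.mk p).get? "tier" with
    | none => simp [ih]
    | some v =>
      by_cases hv : v = t
      · subst hv
        have hmem : v ∈ known := (PySem.Set.contains_iff _ _).mp ht
        simp [ih, hmem, PySem.Dict.getD_modify_self]
      · have h1 : ((some v : Option String) == some t) = false := by simp [hv]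
        rw [h1]
        by_cases hmem : v ∈ known
        · simp [ih, hmem, PySem.Dict.getD_modify, Ne.symm hv]
        · simp [ih, hmem]

-- rest invariant: the second component collects exactly the unknown-tier profiles, in order
lemma pvLoop_snd (known : PySem.Set String) (cfg : List (List (String × String)))
    (d : PySem.Dict String (List (List (String × String)))) (r : List (List (String × String))) :
    (cfg.foldl (pvStep known) (d, r)).2
      = r ++ cfg.filter (fun p =>
          match (PySem.Dict.mk p).get? "tier" with
          | none => true
          | some v => !(PySem.Set.contains known v)) := by
  induction cfg generalizing d r with
  | nil => simp
  | cons p cfg ih =>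
    simp only [List.foldl_cons, List.filter_cons, pvStep]
    cases hg : (PySem.Dict.mk p).get? "tier" with
    | none => simp [ih]
    | some v =>
      by_cases hmem : v ∈ known
      · simp [ih, hmem]
      · simp [ih, hmem]

-- ===== VERDICT (by name: the statement is the Claim_ definition above) =====
theorem profiles_in_summary_order_spec : Claim_equal_profiles_in_summary_order := by
  intro cfg tier_order _
  unfold Spec_profiles_in_summary_order profiles_in_summary_order profiles_in_summary_order_alt
  simp only []
  -- B's grouping loop is pvStep
  have hloop : ∀ st, cfg.foldl
      (fun (st : PySem.Dict String (List (List (String × String))) × List (List (String × String))) p =>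
        match (PySem.Dict.mk p).get? "tier" with
        | some t =>
            if PySem.Set.contains (PySem.Set.ofList tier_order) t then
              (st.1.modify t [] (· ++ [p]), st.2)
            else (st.1, st.2 ++ [p])
        | none => (st.1, st.2 ++ [p])) st
      = cfg.foldl (pvStep (PySem.Set.ofList tier_order)) st := by
    intro st; rfl
  rw [hloop]
  -- second loop of A appends exactly the unknown-tier filter
  rw [PySem.List.foldl_append_if_eq_filter]
  rw [pvLoop_snd]
  simp only [List.nil_append]
  congr 1
  -- first loop of A = B's emission loop, tier by tier
  refine PySem.List.foldl_congr_mem' _ _ _ _ (fun t ht acc => ?_)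
  have hc : PySem.Set.contains (PySem.Set.ofList tier_order) t = true :=
    (PySem.Set.contains_iff _ _).mpr ((PySem.Set.mem_ofList _ _).mpr ht)
  rw [pvLoop_fst _ _ hc]
  simp
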